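-- pv_equiv track=rewrite | github.com/SimGus/Chatette | chatette/parsing/parser_utils.py | remove_escapement
-- ===== SOURCE A (Python) =====
-- ESCAPE_SYM = '\\'
--
-- ARG_SYM = '$'  # This shouldn't be changed
--
-- def remove_escapement(text):
--     # pylint: disable=anomalous-backslash-in-string
--     r"""
--     Returns `text` were all escaped characters
--     have been removed their escapement character (e.g. `\?` becomes `?`).
--     Note that escaped dollar sign ($) are kept escaped until generation
--     to avoid a possible bug with argument replacement.
--     """
--     if text is None:
--         return None
--     if ESCAPE_SYM not in text:
--         return text
--     # Note there might be better ways to do this with regexes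
--     # (but they have fixed-length negative lookback)
--     result = ""
--     escaped = False
--     for c in text:
--         if escaped and c == ARG_SYM:  # Keep \$ until generation
--             result += ESCAPE_SYM + ARG_SYM
--             escaped = False
--         elif escaped:
--             result += c
--             escaped = False
--         elif c == ESCAPE_SYM:
--             escaped = True
--         else:
--             result += c
--     return result
-- ===== SOURCE B (Python) =====
-- import re
--
-- def remove_escapement(text):
--     if text is None:
--         return None
--     return re.sub(r'\\(.)?',
--                   lambda m: '\\$' if m.group(1) == '$' else (m.group(1) or ''),
--                   text, flags=re.S)
-- ===== Notes on version B (the rewrite author's own statement) =====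
-- stated objective: idiomatic
-- what changed: Replaced the manual character-by-character escaped-flag state machine by a single re.sub over the pattern \\(.)? whose replacement function keeps \$, unescapes any other char and drops a trailing lone backslash.
import Mathlib
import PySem

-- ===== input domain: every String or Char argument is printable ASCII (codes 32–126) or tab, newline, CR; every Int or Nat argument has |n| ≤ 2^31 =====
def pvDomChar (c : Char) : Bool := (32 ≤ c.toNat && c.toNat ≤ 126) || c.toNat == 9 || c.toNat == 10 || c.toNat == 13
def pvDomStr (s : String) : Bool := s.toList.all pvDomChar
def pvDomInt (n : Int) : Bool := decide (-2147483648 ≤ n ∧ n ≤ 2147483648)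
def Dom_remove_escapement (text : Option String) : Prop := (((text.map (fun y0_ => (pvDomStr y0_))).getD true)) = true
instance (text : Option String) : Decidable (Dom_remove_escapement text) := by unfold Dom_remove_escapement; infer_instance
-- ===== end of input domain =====

-- B replaces A's character-by-character escaped-flag state machine by a single regex-style
-- substitution (re.sub over '\\(.)?'), ported as a two-character-at-a-time structural recursion. (objective: idiomatic)

-- ===== PORT A =====
-- the for-loop with its (result, escaped) state, as a foldl over the characters
def remove_escapement (text : Option String) : Option String :=
  match text with
  | none => none
  | some t =>
    if PySem.Str.isIn "\\" t = false then some t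
    else
      let st := t.toList.foldl (fun (p : List Char × Bool) c =>
        if p.2 ∧ c = '$' then (p.1 ++ ['\\', '$'], false)
        else if p.2 then (p.1 ++ [c], false)
        else if c = '\\' then (p.1, true)
        else (p.1 ++ [c], false)) ([], false)
      some (String.ofList st.1)

-- ===== PORT B =====
-- the regex engine's traversal for re.sub(r'\\(.)?', repl, text): at a backslash consume the
-- optional next char and apply repl; elsewhere copy the char (exact for this pattern)
def altSub : List Char → List Char
  | [] => []
  | [c] => if c = '\\' then [] else [c]
  | c :: d :: rest =>
    if c = '\\' then (if d = '$' then ['\\', '$'] else [d]) ++ altSub rest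
    else c :: altSub (d :: rest)

def remove_escapement_alt (text : Option String) : Option String :=
  text.map (fun t => String.ofList (altSub t.toList))

-- ===== PRECONDITION & SPEC =====
def Spec_remove_escapement (text : Option String) (out : Option String) : Prop := out = remove_escapement_alt text
instance (text : Option String) (out : Option String) : Decidable (Spec_remove_escapement text out) := by unfold Spec_remove_escapement; infer_instance

-- ===== CLAIM (what is proved, stated in full; the proofs are below) =====
def Claim_equal_remove_escapement : Prop := ∀ (text : Option String), Dom_remove_escapement text → Spec_remove_escapement text (remove_escapement text)

-- ===== LEMMAS AND PROOFS =====

-- altSub on a string without backslashes is the identity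
theorem altSub_of_not_mem : ∀ (l : List Char), '\\' ∉ l → altSub l = l := by
  intro l
  induction l using altSub.induct <;> intro h <;> simp_all [altSub]

-- the value of altSub after an initial backslash was consumed
def escSub : List Char → List Char
  | [] => []
  | c :: rest => (if c = '$' then ['\\', '$'] else [c]) ++ altSub rest

theorem altSub_backslash (rest : List Char) : altSub ('\\' :: rest) = escSub rest := by
  cases rest with
  | nil => rfl
  | cons d r => simp [altSub, escSub]

theorem altSub_cons_ne (c : Char) (rest : List Char) (hc : c ≠ '\\') :
    altSub (c :: rest) = c :: altSub rest := by
  cases rest with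
  | nil => simp [altSub, hc]
  | cons d r => simp [altSub, hc]

-- the loop invariant: A's fold from (acc, b) produces acc ++ (escSub / altSub of the rest)
theorem fold_eq (l : List Char) : ∀ (acc : List Char) (b : Bool),
    (l.foldl (fun (p : List Char × Bool) c =>
        if p.2 ∧ c = '$' then (p.1 ++ ['\\', '$'], false)
        else if p.2 then (p.1 ++ [c], false)
        else if c = '\\' then (p.1, true)
        else (p.1 ++ [c], false)) (acc, b)).1
      = acc ++ (if b then escSub l else altSub l) := by
  induction l with
  | nil => intro acc b; cases b <;> simp [altSub, escSub]
  | cons c rest ih =>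
    intro acc b
    cases b with
    | true =>
      by_cases hc : c = '$' <;>
        simp [List.foldl_cons, hc, ih, escSub]
    | false =>
      by_cases hc : c = '\\'
      · subst hc
        simp [List.foldl_cons, ih, altSub_backslash]
      · simp [List.foldl_cons, hc, ih, altSub_cons_ne c rest hc]

-- ===== VERDICT (by name: the statement is the Claim_ definition above) =====
theorem remove_escapement_spec : Claim_equal_remove_escapement := by
  intro text _
  unfold Spec_remove_escapement remove_escapement remove_escapement_alt
  cases text with
  | none => rfl
  | some t =>
    simp only [Option.map_some]
    by_cases h : PySem.Str.isIn "\\" t = false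
    · rw [if_pos h]
      have hmem : '\\' ∉ t.toList := by
        intro hm
        obtain ⟨l1, l2, hl⟩ := List.append_of_mem hm
        have h2 : PySem.Str.isIn "\\" t = true := by
          rw [PySem.Str.isIn_iff_infix]
          exact ⟨l1, l2, by rw [hl]; simp⟩
        exact absurd h2 (by simp_all)
      rw [altSub_of_not_mem t.toList hmem]
      simp
    · rw [if_neg h]
      simp [fold_eq]
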